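-- pv_equiv track=rewrite | github.com/Rafael-R/ist-projects | Foundations of Programming/1718/2.py | e_conjunto_palavras
-- ===== SOURCE A (Python) =====
-- from string import ascii_uppercase
--
-- alfabeto = list(ascii_uppercase)
--
-- def e_palavra_potencial(universal):
--     """
--     e_palavra_potencial: universal -> lógico
--     Este reconhecedor recebe um unico argumento e devolve True caso esse argumento
--     seja do tipo palavra_potencial, e False em caso contrario.
--     """
--     if not isinstance(universal, str):
--         return False
--     else:
--         if universal == '':
--             return True
--         elif universal[0] in alfabeto:
--             return e_palavra_potencial(universal[1:])
--         else:
--             return False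
--
-- def e_conjunto_palavras(universal):
--     """
--     e_conjunto_palavras: universal -> lógico
--     Este reconhecedor recebe um unico argumento e devolve True caso esse
--     argumento seja do tipo conjunto_palavras, e False em caso contrario.
--     """
--     if not isinstance(universal, list):
--         return False
--     else:
--         if universal == []:
--             return True
--         elif e_palavra_potencial(universal[0]):
--             return e_conjunto_palavras(universal[1:])
--         else:
--             return False
-- ===== SOURCE B (Python) =====
-- from string import ascii_uppercase
--
-- def e_conjunto_palavras(universal):
--     """Same recognizer, by flattening: a list of strings whose joined characters
--     form a subset of the uppercase alphabet."""
--     if not isinstance(universal, list):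
--         return False
--     for word in universal:
--         if not isinstance(word, str):
--             return False
--     return set("".join(universal)).issubset(set(ascii_uppercase))
-- ===== Notes on version B (the rewrite author's own statement) =====
-- stated objective: alternative
-- what changed: Replaces the pair of recursive head/tail slicing recognizers with a flat check: join all words into one string and test that its character set is a subset of the uppercase alphabet (per-word/per-char recursion disappears).
import Mathlib
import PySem

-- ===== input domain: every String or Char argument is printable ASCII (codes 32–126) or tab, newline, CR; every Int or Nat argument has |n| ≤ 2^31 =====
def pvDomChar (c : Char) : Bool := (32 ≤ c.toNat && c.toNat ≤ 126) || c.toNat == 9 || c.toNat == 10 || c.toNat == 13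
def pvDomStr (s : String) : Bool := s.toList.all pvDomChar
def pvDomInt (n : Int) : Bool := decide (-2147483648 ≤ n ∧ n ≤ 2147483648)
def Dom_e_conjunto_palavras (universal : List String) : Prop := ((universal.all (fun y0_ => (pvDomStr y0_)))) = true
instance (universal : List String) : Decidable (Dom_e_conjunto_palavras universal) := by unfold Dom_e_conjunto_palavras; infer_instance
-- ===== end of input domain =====

-- B checks the same predicate by joining all words and testing set inclusion of
-- the joined characters in the alphabet, instead of A's per-word recursive slicing.

-- ===== PORT A =====
-- alfabeto = list(ascii_uppercase); membership of the one-character string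
-- universal[0] is ported as membership of the character in this char list (exact).
def pvAlfabeto : List Char := "ABCDEFGHIJKLMNOPQRSTUVWXYZ".toList

-- e_palavra_potencial: isinstance(·, str) is always true under the type convention;
-- recursion on universal[1:] is recursion on the tail of the char list.
def e_palavra_potencial (universal : List Char) : Bool :=
  match universal with
  | [] => true
  | c :: rest => if c ∈ pvAlfabeto then e_palavra_potencial rest else false

def e_conjunto_palavras (universal : List String) : Bool :=
  match universal with
  | [] => true
  | w :: rest => if e_palavra_potencial w.toList then e_conjunto_palavras rest else false

-- ===== PORT B =====
-- isinstance checks are always true under the type convention; "".join is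
-- PySem.Chars.join with empty separator; set(...).issubset(set(...)) is PySem.Set.
def e_conjunto_palavras_alt (universal : List String) : Bool :=
  PySem.Set.issubset
    (PySem.Set.ofList (PySem.Chars.join [] (universal.map String.toList)))
    (PySem.Set.ofList pvAlfabeto)

-- ===== PRECONDITION & SPEC =====
def Spec_e_conjunto_palavras (universal : List String) (out : Bool) : Prop := out = e_conjunto_palavras_alt universal
instance (universal : List String) (out : Bool) : Decidable (Spec_e_conjunto_palavras universal out) := by unfold Spec_e_conjunto_palavras; infer_instance

-- ===== CLAIM (what is proved, stated in full; the proofs are below) =====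
def Claim_equal_e_conjunto_palavras : Prop := ∀ (universal : List String), Dom_e_conjunto_palavras universal → Spec_e_conjunto_palavras universal (e_conjunto_palavras universal)

-- ===== LEMMAS AND PROOFS =====

theorem pv_palavra_iff (cs : List Char) :
    e_palavra_potencial cs = true ↔ ∀ c ∈ cs, c ∈ pvAlfabeto := by
  induction cs with
  | nil => simp [e_palavra_potencial]
  | cons c rest ih =>
      simp only [e_palavra_potencial, List.mem_cons]
      by_cases h : c ∈ pvAlfabeto <;> simp [h, ih]

theorem pv_a_iff (universal : List String) :
    e_conjunto_palavras universal = true ↔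
      ∀ w ∈ universal, ∀ c ∈ w.toList, c ∈ pvAlfabeto := by
  induction universal with
  | nil => simp [e_conjunto_palavras]
  | cons w rest ih =>
      simp only [e_conjunto_palavras, List.mem_cons]
      by_cases hp : e_palavra_potencial w.toList = true
      · rw [if_pos hp, ih]
        rw [pv_palavra_iff] at hp
        constructor
        · rintro hrest w' (rfl | hw')
          · exact hp
          · exact hrest w' hw'
        · intro hall w' hw'
          exact hall w' (Or.inr hw')
      · rw [if_neg hp]
        simp only [Bool.false_eq_true, false_iff]
        intro hall
        exact hp ((pv_palavra_iff w.toList).mpr (fun c hc => hall w (Or.inl rfl) c hc))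

theorem pv_join_nil_eq_flatten (ls : List (List Char)) :
    PySem.Chars.join [] ls = ls.flatten := by
  induction ls with
  | nil => simp [PySem.Chars.join_nil]
  | cons x rest ih =>
      cases rest with
      | nil => simp [PySem.Chars.join_singleton]
      | cons y t =>
          rw [PySem.Chars.join_cons_cons, ih]
          simp

-- ===== VERDICT (by name: the statement is the Claim_ definition above) =====
theorem e_conjunto_palavras_spec : Claim_equal_e_conjunto_palavras := by
  intro universal _
  unfold Spec_e_conjunto_palavras e_conjunto_palavras_alt
  rw [pv_join_nil_eq_flatten]
  rcases hb : PySem.Set.issubset (PySem.Set.ofList (universal.map String.toList).flatten) (PySem.Set.ofList pvAlfabeto) with _ | _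
  · -- B false: some char outside the alphabet, so A is false too
    rw [← Bool.not_eq_true] at hb ⊢
    intro ha
    apply hb
    rw [PySem.Set.issubset_iff]
    intro x hx
    rw [PySem.Set.mem_ofList] at hx ⊢
    rw [List.mem_flatten] at hx
    obtain ⟨l, hl, hxl⟩ := hx
    rw [List.mem_map] at hl
    obtain ⟨w, hw, rfl⟩ := hl
    exact (pv_a_iff universal).mp ha w hw x hxl
  · rw [pv_a_iff]
    intro w hw c hc
    rw [PySem.Set.issubset_iff] at hb
    have := hb c (by
      rw [PySem.Set.mem_ofList, List.mem_flatten]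
      exact ⟨w.toList, List.mem_map_of_mem hw, hc⟩)
    rwa [PySem.Set.mem_ofList] at this
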